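-- pv_equiv track=rewrite | github.com/Muzzle-kr/AlgorithmAutoSave | 백준/Silver/14562. 태권왕/태권왕.py | bfs
-- ===== SOURCE A (Python) =====
-- from collections import deque
--
-- def bfs(s, t):
--     q = deque()
--     q.append((s, t, 0))
--
--     while q:
--         x, goal, cnt = q.popleft()
--
--         if x == goal:
--             return cnt
--
--         if x+1 <= goal:
--             q.append((x+1, goal, cnt+1))
--
--         if x*2 <= goal+3:
--             q.append((x*2, goal+3, cnt+1))
--
--     return 0
-- ===== SOURCE B (Python) =====
-- def bfs(s, t):
--     frontier = [(s, t)]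
--     visited = {(s, t)}
--     cnt = 0
--     while frontier:
--         nxt = []
--         for x, goal in frontier:
--             if x == goal:
--                 return cnt
--             if x + 1 <= goal and (x + 1, goal) not in visited:
--                 visited.add((x + 1, goal))
--                 nxt.append((x + 1, goal))
--             if x * 2 <= goal + 3 and (x * 2, goal + 3) not in visited:
--                 visited.add((x * 2, goal + 3))
--                 nxt.append((x * 2, goal + 3))
--         frontier = nxt
--         cnt += 1
--     return 0
-- ===== Notes on version B (the rewrite author's own statement) =====
-- stated objective: alternative
-- what changed: A explores the (x,goal) state tree with a single FIFO deque of (x,goal,cnt) triples and no deduplication, so duplicate states are re-expanded; B runs a level-by-level BFS with a visited set, expanding each distinct (x,goal) state at most once and counting levels instead of tagging each queue entry with its depth.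
import Mathlib
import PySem

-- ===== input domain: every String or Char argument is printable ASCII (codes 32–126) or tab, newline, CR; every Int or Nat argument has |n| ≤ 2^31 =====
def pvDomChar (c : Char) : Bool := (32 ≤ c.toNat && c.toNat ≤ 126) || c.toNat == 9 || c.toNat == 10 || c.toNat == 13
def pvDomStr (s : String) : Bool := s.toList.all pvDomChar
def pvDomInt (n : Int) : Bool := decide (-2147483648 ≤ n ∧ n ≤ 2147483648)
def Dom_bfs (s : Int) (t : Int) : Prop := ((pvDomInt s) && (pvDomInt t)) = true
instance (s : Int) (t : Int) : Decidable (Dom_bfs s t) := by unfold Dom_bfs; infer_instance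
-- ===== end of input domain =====

-- B replaces A's duplicate-blind single-deque BFS by a level-by-level BFS with a visited set, so each (x, goal) state is expanded at most once (objective: alternative).

-- ===== PORT A =====
-- A's `while q` loop, FIFO deque of (x, goal, cnt) triples.  The Python loop terminates on
-- every input (proved below via the level decomposition); the fuel argument only makes the
-- very same loop structurally recursive, and `bfsFuel` is proved large enough in `bfsLoop_run`.
def bfsLoop : Nat → List (Int × Int × Int) → Int
  | 0, _ => 0
  | _ + 1, [] => 0
  | f + 1, (x, goal, cnt) :: q =>
    if x = goal then cnt
    else
      let q1 := if x + 1 ≤ goal then q ++ [(x + 1, goal, cnt + 1)] else q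
      let q2 := if x * 2 ≤ goal + 3 then q1 ++ [(x * 2, goal + 3, cnt + 1)] else q1
      bfsLoop f q2

def bfsFuel (s t : Int) : Nat :=
  if s ≤ t then 2 ^ ((t - s).toNat + 2)
  else if s * 2 ≤ t + 3 then 2 ^ ((t + 3 - s * 2).toNat + 3)
  else 1

def bfs (s : Int) (t : Int) : Int := bfsLoop (bfsFuel s t) [(s, t, 0)]

-- ===== PORT B =====
-- one `if x+1 <= goal and (x+1, goal) not in visited: visited.add(...); nxt.append(...)` block of B
def pushChild (ok : Prop) [Decidable ok] (c : Int × Int)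
    (vn : PySem.Set (Int × Int) × List (Int × Int)) :
    PySem.Set (Int × Int) × List (Int × Int) :=
  if ok ∧ PySem.Set.contains vn.1 c = false then (PySem.Set.add vn.1 c, vn.2 ++ [c]) else vn

-- one pass of B's inner `for x, goal in frontier` loop: `none` = the `return cnt` was hit
def stepLevel : List (Int × Int) → PySem.Set (Int × Int) → List (Int × Int) →
    Option (List (Int × Int) × PySem.Set (Int × Int))
  | [], vis, nxt => some (nxt, vis)
  | (x, goal) :: rest, vis, nxt =>
    if x = goal then none
    else
      let vn2 := pushChild (x * 2 ≤ goal + 3) (x * 2, goal + 3)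
        (pushChild (x + 1 ≤ goal) (x + 1, goal) (vis, nxt))
      stepLevel rest vn2.1 vn2.2

-- B's outer `while frontier` loop; the fuel only makes it structurally recursive and is
-- proved large enough below (B finishes after at most bfsAltFuel - 1 levels).
def bfsAltLoop : Nat → List (Int × Int) → PySem.Set (Int × Int) → Int → Int
  | 0, _, _, _ => 0
  | f + 1, frontier, vis, cnt =>
    if frontier.isEmpty then 0
    else
      match stepLevel frontier vis [] with
      | none => cnt
      | some (nxt, vis') => bfsAltLoop f nxt vis' (cnt + 1)

def bfsAltFuel (s t : Int) : Nat :=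
  if s ≤ t then (t - s).toNat + 2
  else if s * 2 ≤ t + 3 then (t + 3 - s * 2).toNat + 3
  else 2

def bfs_alt (s : Int) (t : Int) : Int :=
  bfsAltLoop (bfsAltFuel s t) [(s, t)] (PySem.Set.ofList [(s, t)]) 0

-- ===== PRECONDITION & SPEC =====
def Spec_bfs (s : Int) (t : Int) (out : Int) : Prop := out = bfs_alt s t
instance (s : Int) (t : Int) (out : Int) : Decidable (Spec_bfs s t out) := by unfold Spec_bfs; infer_instance

-- ===== CLAIM (what is proved, stated in full; the proofs are below) =====
def Claim_equal_bfs : Prop := ∀ (s : Int) (t : Int), Dom_bfs s t → Spec_bfs s t (bfs s t)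

-- ===== LEMMAS AND PROOFS =====

-- the successors of a state (x, goal) in the order A and B generate them
def succs (p : Int × Int) : List (Int × Int) :=
  (if p.1 + 1 ≤ p.2 then [(p.1 + 1, p.2)] else []) ++
  (if p.1 * 2 ≤ p.2 + 3 then [(p.1 * 2, p.2 + 3)] else [])

-- the n-th BFS level of the (duplicate-blind) search tree rooted at (s, t)
def Lv (s t : Int) : Nat → List (Int × Int)
  | 0 => [(s, t)]
  | n + 1 => (Lv s t n).flatMap succs

def existsDiag (s t : Int) (n : Nat) : Prop := ∃ p ∈ Lv s t n, p.1 = p.2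

@[reducible] def PDec (s t : Int) : DecidablePred (existsDiag s t) := fun n => by
  unfold existsDiag; infer_instance

-- B's (frontier, visited) pair after n completed levels (junk after the level B returns in)
def FV (s t : Int) : Nat → List (Int × Int) × PySem.Set (Int × Int)
  | 0 => ([(s, t)], PySem.Set.ofList [(s, t)])
  | n + 1 =>
    match stepLevel (FV s t n).1 (FV s t n).2 [] with
    | some r => r
    | none => ([], (FV s t n).2)

theorem succs_len (p : Int × Int) : (succs p).length ≤ 2 := by
  unfold succs; split <;> split <;> simp

theorem mem_succs_one (x g : Int) (h : x + 1 ≤ g) : (x + 1, g) ∈ succs (x, g) := by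
  simp [succs, h]

theorem mem_succs_two (x g : Int) (h : x * 2 ≤ g + 3) : (x * 2, g + 3) ∈ succs (x, g) := by
  simp [succs, h]

theorem flatLen (l : List (Int × Int)) : (l.flatMap succs).length ≤ 2 * l.length := by
  induction l with
  | nil => simp
  | cons a l ih =>
    simp only [List.flatMap_cons, List.length_append, List.length_cons]
    have := succs_len a; omega

theorem lenLv (s t : Int) (n : Nat) : (Lv s t n).length ≤ 2 ^ n := by
  induction n with
  | zero => simp [Lv]
  | succ n ih =>
    have h := flatLen (Lv s t n)
    have : (Lv s t (n + 1)).length ≤ 2 * (Lv s t n).length := h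
    calc (Lv s t (n + 1)).length ≤ 2 * (Lv s t n).length := h
      _ ≤ 2 * 2 ^ n := by omega
      _ = 2 ^ (n + 1) := by ring

theorem sumLen (s t : Int) (n : Nat) :
    (∑ i ∈ Finset.range (n + 1), (Lv s t i).length) ≤ 2 ^ (n + 1) := by
  induction n with
  | zero => simp [Lv]
  | succ n ih =>
    rw [Finset.sum_range_succ]
    have := lenLv s t (n + 1)
    have h2 : (2:Nat) ^ (n + 2) = 2 ^ (n + 1) + 2 ^ (n + 1) := by ring
    omega

theorem first_split (l : List (Int × Int)) (h : ∃ x ∈ l, x.1 = x.2) :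
    ∃ pre d rest, l = pre ++ d :: rest ∧ (∀ x ∈ pre, x.1 ≠ x.2) ∧ d.1 = d.2 := by
  induction l with
  | nil => simp at h
  | cons a l ih =>
    by_cases ha : a.1 = a.2
    · exact ⟨[], a, l, by simp, by simp, ha⟩
    · have h' : ∃ x ∈ l, x.1 = x.2 := by
        obtain ⟨x, hx, he⟩ := h
        rcases List.mem_cons.mp hx with hx1 | hx1
        · exact absurd he (by simpa [hx1] using ha)
        · exact ⟨x, hx1, he⟩
      obtain ⟨pre, d, rest, h1, h2, h3⟩ := ih h'
      refine ⟨a :: pre, d, rest, by simp [h1], ?_, h3⟩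
      intro x hx
      rcases List.mem_cons.mp hx with hx1 | hx1
      · simpa [hx1] using ha
      · exact h2 x hx1

theorem bfsLoop_step (f : Nat) (x g cnt : Int) (q : List (Int × Int × Int)) (h : x ≠ g) :
    bfsLoop (f + 1) ((x, g, cnt) :: q)
    = bfsLoop f (q ++ (succs (x, g)).map (fun p => (p.1, p.2, cnt + 1))) := by
  simp only [bfsLoop, if_neg h]
  by_cases h1 : x + 1 ≤ g <;> by_cases h2 : x * 2 ≤ g + 3 <;>
    simp [succs, h1, h2, List.append_assoc]

theorem bfsLoop_consume (c : Int) : ∀ (cur next : List (Int × Int)) (f : Nat),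
    (∀ p ∈ cur, p.1 ≠ p.2) →
    bfsLoop (f + cur.length)
      (cur.map (fun p => (p.1, p.2, c)) ++ next.map (fun p => (p.1, p.2, c + 1)))
    = bfsLoop f ((next ++ cur.flatMap succs).map (fun p => (p.1, p.2, c + 1))) := by
  intro cur
  induction cur with
  | nil => intro next f _; simp
  | cons a cur ih =>
    intro next f hnd
    obtain ⟨x, g⟩ := a
    have hxg : x ≠ g := by simpa using hnd (x, g) List.mem_cons_self
    simp only [List.map_cons, List.cons_append, List.length_cons]
    have hlen : f + (cur.length + 1) = (f + cur.length) + 1 := by omega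
    rw [hlen, bfsLoop_step _ _ _ _ _ hxg, List.append_assoc, ← List.map_append,
      ih (next ++ succs (x, g)) f (fun p hp => hnd p (List.mem_cons_of_mem _ hp))]
    simp [List.flatMap_cons, List.append_assoc]

theorem bfsLoop_find (c : Int) : ∀ (pre : List (Int × Int)) (d : Int × Int)
    (junk : List (Int × Int × Int)) (f : Nat),
    (∀ p ∈ pre, p.1 ≠ p.2) → d.1 = d.2 →
    bfsLoop (f + pre.length + 1) (pre.map (fun p => (p.1, p.2, c)) ++ (d.1, d.2, c) :: junk)
    = c := by
  intro pre
  induction pre with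
  | nil => intro d junk f _ hd; simp [bfsLoop, hd]
  | cons a pre ih =>
    intro d junk f hnd hd
    obtain ⟨x, g⟩ := a
    have hxg : x ≠ g := by simpa using hnd (x, g) List.mem_cons_self
    simp only [List.map_cons, List.cons_append, List.length_cons]
    have hlen : f + (pre.length + 1) + 1 = (f + pre.length + 1) + 1 := by omega
    rw [hlen, bfsLoop_step _ _ _ _ _ hxg, List.append_assoc, List.cons_append]
    exact ih d _ f (fun p hp => hnd p (List.mem_cons_of_mem _ hp)) hd

theorem bfsLoop_run (s t : Int) : ∀ (m k f : Nat),
    (∀ i, i < m → ∀ p ∈ Lv s t (k + i), p.1 ≠ p.2) →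
    existsDiag s t (k + m) →
    (∑ i ∈ Finset.range (m + 1), (Lv s t (k + i)).length) ≤ f →
    bfsLoop f ((Lv s t k).map (fun p => (p.1, p.2, (k : Int)))) = ((k + m : Nat) : Int) := by
  intro m
  induction m with
  | zero =>
    intro k f _ hdiag hsum
    obtain ⟨pre, d, rest, h1, h2, h3⟩ := first_split _ hdiag
    simp only [Nat.add_zero] at h1
    have hlenk : pre.length + 1 ≤ (Lv s t k).length := by
      rw [h1, List.length_append, List.length_cons]; omega
    simp only [Nat.zero_add, Finset.sum_range_one, Nat.add_zero] at hsum
    obtain ⟨f', rfl⟩ : ∃ f', f = f' + pre.length + 1 :=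
      ⟨f - (pre.length + 1), by omega⟩
    rw [h1]
    simp only [List.map_append, List.map_cons]
    have := bfsLoop_find (k : Int) pre d (rest.map (fun p => (p.1, p.2, (k : Int)))) f' h2 h3
    simpa using this
  | succ m ih =>
    intro k f hfree hdiag hsum
    have hfree0 : ∀ p ∈ Lv s t k, p.1 ≠ p.2 := by
      have := hfree 0 (by omega); simpa using this
    have hsum' : (∑ i ∈ Finset.range (m + 1), (Lv s t (k + 1 + i)).length)
        + (Lv s t k).length ≤ f := by
      rw [Finset.sum_range_succ'] at hsum
      have hre : (∑ i ∈ Finset.range (m + 1), (Lv s t (k + (i + 1))).length)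
          = ∑ i ∈ Finset.range (m + 1), (Lv s t (k + 1 + i)).length :=
        Finset.sum_congr rfl (fun i _ => by rw [show k + (i + 1) = k + 1 + i by omega])
      rw [hre, Nat.add_zero] at hsum
      exact hsum
    obtain ⟨f', rfl⟩ : ∃ f', f = f' + (Lv s t k).length :=
      ⟨f - (Lv s t k).length, by omega⟩
    have hcons := bfsLoop_consume (k : Int) (Lv s t k) [] f' hfree0
    simp only [List.map_nil, List.append_nil, List.nil_append] at hcons
    rw [hcons]
    have hLv : (Lv s t k).flatMap succs = Lv s t (k + 1) := rfl
    have hcast : ((k : Int) + 1) = ((k + 1 : Nat) : Int) := by push_cast; ring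
    rw [hLv, hcast]
    have := ih (k + 1) f'
      (fun i hi => by
        have h5 := hfree (i + 1) (by omega)
        rwa [show k + (i + 1) = k + 1 + i by omega] at h5)
      (by rwa [show k + 1 + m = k + (m + 1) by omega])
      (by omega)
    rw [this]
    congr 1
    omega

theorem path_up (s t : Int) : ∀ (d : Nat) (x g : Int) (n : Nat),
    (x, g) ∈ Lv s t n → x ≤ g → (g - x).toNat = d → (g, g) ∈ Lv s t (n + d) := by
  intro d
  induction d with
  | zero =>
    intro x g n hm hle hd
    have : x = g := by omega
    subst this
    simpa using hm
  | succ d ih =>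
    intro x g n hm hle hd
    have hlt : x + 1 ≤ g := by omega
    have hstep : (x + 1, g) ∈ Lv s t (n + 1) := by
      show (x + 1, g) ∈ (Lv s t n).flatMap succs
      exact List.mem_flatMap.mpr ⟨(x, g), hm, mem_succs_one x g hlt⟩
    have := ih (x + 1) g (n + 1) hstep (by omega) (by omega)
    have he : n + 1 + d = n + (d + 1) := by omega
    rwa [he] at this

-- ===== B-side lemmas: pushChild / stepLevel properties =====

theorem mem_succs_iff (q : Int × Int) (x g : Int) :
    q ∈ succs (x, g) ↔ (x + 1 ≤ g ∧ q = (x + 1, g)) ∨ (x * 2 ≤ g + 3 ∧ q = (x * 2, g + 3)) := by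
  unfold succs
  by_cases h1 : x + 1 ≤ g <;> by_cases h2 : x * 2 ≤ g + 3 <;> simp [h1, h2]

theorem pushChild_vis_mono (ok : Prop) [Decidable ok] (c : Int × Int) (vn) :
    ∀ q ∈ vn.1, q ∈ (pushChild ok c vn).1 := by
  intro q hq; unfold pushChild; split
  · exact (PySem.Set.mem_add _ _ _).mpr (Or.inl hq)
  · exact hq

theorem pushChild_nxt_mono (ok : Prop) [Decidable ok] (c : Int × Int) (vn) :
    ∀ q ∈ vn.2, q ∈ (pushChild ok c vn).2 := by
  intro q hq; unfold pushChild; split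
  · simp [hq]
  · exact hq

theorem pushChild_nxt_src (ok : Prop) [Decidable ok] (c : Int × Int) (vn) :
    ∀ q ∈ (pushChild ok c vn).2, q ∈ vn.2 ∨ (ok ∧ q = c) := by
  intro q hq; unfold pushChild at hq; split at hq
  · rename_i h
    rcases List.mem_append.mp hq with h1 | h1
    · exact Or.inl h1
    · exact Or.inr ⟨h.1, by simpa using h1⟩
  · exact Or.inl hq

theorem pushChild_vis_decomp (ok : Prop) [Decidable ok] (c : Int × Int) (vn) :
    ∀ q ∈ (pushChild ok c vn).1, q ∈ vn.1 ∨ q ∈ (pushChild ok c vn).2 := by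
  intro q hq; unfold pushChild at hq ⊢; split at hq
  · rcases (PySem.Set.mem_add _ _ _).mp hq with h | h
    · exact Or.inl h
    · subst h; simp_all
  · exact Or.inl hq

theorem pushChild_covers (ok : Prop) [Decidable ok] (c : Int × Int) (vn) (hok : ok) :
    c ∈ (pushChild ok c vn).1 := by
  by_cases hc : PySem.Set.contains vn.1 c = false
  · unfold pushChild
    rw [if_pos ⟨hok, hc⟩]; exact (PySem.Set.mem_add _ _ _).mpr (Or.inr rfl)
  · have hmem : c ∈ vn.1 := (PySem.Set.contains_iff _ _).mp (by
      revert hc; cases PySem.Set.contains vn.1 c <;> simp)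
    exact pushChild_vis_mono ok c vn c hmem

theorem step_mono : ∀ (cur : List (Int × Int)) (vis : PySem.Set (Int × Int)) (nxt n' : List (Int × Int)) (v' : PySem.Set (Int × Int)),
    stepLevel cur vis nxt = some (n', v') →
    (∀ q ∈ vis, q ∈ v') ∧ (∀ q ∈ nxt, q ∈ n') := by
  intro cur
  induction cur with
  | nil =>
    intro vis nxt n' v' hs
    simp only [stepLevel, Option.some.injEq, Prod.mk.injEq] at hs
    exact ⟨fun q hq => hs.2 ▸ hq, fun q hq => hs.1 ▸ hq⟩
  | cons a rest ih =>
    intro vis nxt n' v' hs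
    obtain ⟨x, g⟩ := a
    by_cases hxg : x = g
    · simp [stepLevel, hxg] at hs
    · simp only [stepLevel, if_neg hxg] at hs
      obtain ⟨hv, hn⟩ := ih _ _ _ _ hs
      refine ⟨fun q hq => hv q ?_, fun q hq => hn q ?_⟩
      · exact pushChild_vis_mono _ _ _ q (pushChild_vis_mono _ _ _ q hq)
      · exact pushChild_nxt_mono _ _ _ q (pushChild_nxt_mono _ _ _ q hq)

theorem step_nxt_src : ∀ (cur : List (Int × Int)) (vis : PySem.Set (Int × Int)) (nxt n' : List (Int × Int)) (v' : PySem.Set (Int × Int)),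
    stepLevel cur vis nxt = some (n', v') →
    ∀ q ∈ n', q ∈ nxt ∨ ∃ p ∈ cur, q ∈ succs p := by
  intro cur
  induction cur with
  | nil =>
    intro vis nxt n' v' hs q hq
    simp only [stepLevel, Option.some.injEq, Prod.mk.injEq] at hs
    exact Or.inl (hs.1 ▸ hq)
  | cons a rest ih =>
    intro vis nxt n' v' hs q hq
    obtain ⟨x, g⟩ := a
    by_cases hxg : x = g
    · simp [stepLevel, hxg] at hs
    · simp only [stepLevel, if_neg hxg] at hs
      rcases ih _ _ _ _ hs q hq with h | ⟨p, hp, hps⟩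
      · rcases pushChild_nxt_src _ _ _ q h with h2 | ⟨hok, rfl⟩
        · rcases pushChild_nxt_src _ _ _ q h2 with h3 | ⟨hok, rfl⟩
          · exact Or.inl h3
          · exact Or.inr ⟨(x, g), List.mem_cons_self,
              (mem_succs_iff _ x g).mpr (Or.inl ⟨hok, rfl⟩)⟩
        · exact Or.inr ⟨(x, g), List.mem_cons_self,
            (mem_succs_iff _ x g).mpr (Or.inr ⟨hok, rfl⟩)⟩
      · exact Or.inr ⟨p, List.mem_cons_of_mem _ hp, hps⟩

theorem step_vis_decomp : ∀ (cur : List (Int × Int)) (vis : PySem.Set (Int × Int)) (nxt n' : List (Int × Int)) (v' : PySem.Set (Int × Int)),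
    stepLevel cur vis nxt = some (n', v') →
    ∀ q ∈ v', q ∈ vis ∨ q ∈ n' := by
  intro cur
  induction cur with
  | nil =>
    intro vis nxt n' v' hs q hq
    simp only [stepLevel, Option.some.injEq, Prod.mk.injEq] at hs
    exact Or.inl (hs.2 ▸ hq)
  | cons a rest ih =>
    intro vis nxt n' v' hs q hq
    obtain ⟨x, g⟩ := a
    by_cases hxg : x = g
    · simp [stepLevel, hxg] at hs
    · simp only [stepLevel, if_neg hxg] at hs
      have hn2 := (step_mono _ _ _ _ _ hs).2
      rcases ih _ _ _ _ hs q hq with h | h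
      · rcases pushChild_vis_decomp _ _ _ q h with h2 | h2
        · rcases pushChild_vis_decomp _ _ _ q h2 with h3 | h3
          · exact Or.inl h3
          · exact Or.inr (hn2 q (pushChild_nxt_mono _ _ _ q h3))
        · exact Or.inr (hn2 q h2)
      · exact Or.inr h

theorem step_expand : ∀ (cur : List (Int × Int)) (vis : PySem.Set (Int × Int)) (nxt n' : List (Int × Int)) (v' : PySem.Set (Int × Int)),
    stepLevel cur vis nxt = some (n', v') →
    ∀ p ∈ cur, ∀ q ∈ succs p, q ∈ v' := by
  intro cur
  induction cur with
  | nil => intro vis nxt n' v' hs p hp; simp at hp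
  | cons a rest ih =>
    intro vis nxt n' v' hs p hp q hq
    obtain ⟨x, g⟩ := a
    by_cases hxg : x = g
    · simp [stepLevel, hxg] at hs
    · simp only [stepLevel, if_neg hxg] at hs
      have hv := (step_mono _ _ _ _ _ hs).1
      rcases List.mem_cons.mp hp with rfl | hp1
      · rcases (mem_succs_iff q x g).mp hq with ⟨hok, rfl⟩ | ⟨hok, rfl⟩
        · exact hv _ (pushChild_vis_mono _ _ _ _
            (pushChild_covers (x + 1 ≤ g) (x + 1, g) (vis, nxt) hok))
        · exact hv _ (pushChild_covers (x * 2 ≤ g + 3) (x * 2, g + 3) _ hok)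
      · exact ih _ _ _ _ hs p hp1 q hq

theorem step_total : ∀ (cur : List (Int × Int)) (vis : PySem.Set (Int × Int)) (nxt : List (Int × Int)),
    (∀ p ∈ cur, p.1 ≠ p.2) →
    ∃ n' v', stepLevel cur vis nxt = some (n', v') := by
  intro cur
  induction cur with
  | nil => intro vis nxt _; exact ⟨nxt, vis, rfl⟩
  | cons a rest ih =>
    intro vis nxt hnd
    obtain ⟨x, g⟩ := a
    have hxg : x ≠ g := by simpa using hnd (x, g) List.mem_cons_self
    simp only [stepLevel, if_neg hxg]
    exact ih _ _ (fun p hp => hnd p (List.mem_cons_of_mem _ hp))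

theorem step_none : ∀ (cur : List (Int × Int)) (vis : PySem.Set (Int × Int)) (nxt : List (Int × Int)),
    (∃ p ∈ cur, p.1 = p.2) →
    stepLevel cur vis nxt = none := by
  intro cur
  induction cur with
  | nil => intro vis nxt h; simp at h
  | cons a rest ih =>
    intro vis nxt ⟨p, hp, hd⟩
    obtain ⟨x, g⟩ := a
    by_cases hxg : x = g
    · simp [stepLevel, hxg]
    · simp only [stepLevel, if_neg hxg]
      rcases List.mem_cons.mp hp with rfl | hp1
      · exact absurd hd hxg
      · exact ih _ _ ⟨p, hp1, hd⟩

-- ===== B-side lemmas: the frontier/visited sequence FV =====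

theorem FV_succ_eq (s t : Int) (n : Nat) (h : ∀ p ∈ (FV s t n).1, p.1 ≠ p.2) :
    stepLevel (FV s t n).1 (FV s t n).2 [] = some (FV s t (n + 1)) := by
  obtain ⟨n', v', heq⟩ := step_total (FV s t n).1 (FV s t n).2 [] h
  have : FV s t (n + 1) = (n', v') := by simp only [FV, heq]
  rw [this, heq]

theorem V_mono_step (s t : Int) (n : Nat) :
    ∀ q ∈ (FV s t n).2, q ∈ (FV s t (n + 1)).2 := by
  intro q hq
  rcases heq : stepLevel (FV s t n).1 (FV s t n).2 [] with _ | ⟨n', v'⟩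
  · simp only [FV, heq]; exact hq
  · simp only [FV, heq]
    exact ((step_mono _ _ _ _ _ heq).1 q hq)

theorem V_mono_le (s t : Int) (n m : Nat) (h : n ≤ m) :
    ∀ q ∈ (FV s t n).2, q ∈ (FV s t m).2 := by
  induction m with
  | zero => intro q hq; rw [Nat.le_zero.mp h] at hq; exact hq
  | succ m ih =>
    intro q hq
    rcases Nat.lt_or_ge n (m + 1) with h1 | h1
    · exact V_mono_step s t m q (ih (by omega) q hq)
    · have : n = m + 1 := by omega
      rw [this] at hq; exact hq

theorem F_sub_Lv (s t : Int) (N : Nat) (hmin : ∀ i, i < N → ¬ existsDiag s t i) :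
    ∀ n, n ≤ N → ∀ q ∈ (FV s t n).1, q ∈ Lv s t n := by
  intro n
  induction n with
  | zero => intro _ q hq; simpa [FV, Lv] using hq
  | succ n ih =>
    intro hn q hq
    have hfree : ∀ p ∈ (FV s t n).1, p.1 ≠ p.2 := fun p hp hd =>
      hmin n (by omega) ⟨p, ih (by omega) p hp, hd⟩
    have hstep := FV_succ_eq s t n hfree
    rcases step_nxt_src _ _ _ _ _ hstep q hq with h | ⟨p, hp, hps⟩
    · simp at h
    · exact List.mem_flatMap.mpr ⟨p, ih (by omega) p hp, hps⟩

theorem F_free (s t : Int) (N : Nat) (hmin : ∀ i, i < N → ¬ existsDiag s t i)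
    (n : Nat) (hn : n < N) : ∀ p ∈ (FV s t n).1, p.1 ≠ p.2 := by
  intro p hp hd
  exact hmin n hn ⟨p, F_sub_Lv s t N hmin n (by omega) p hp, hd⟩

theorem V_decomp (s t : Int) (N : Nat) (hmin : ∀ i, i < N → ¬ existsDiag s t i) :
    ∀ n, n ≤ N → ∀ q ∈ (FV s t n).2, ∃ j, j ≤ n ∧ q ∈ (FV s t j).1 := by
  intro n
  induction n with
  | zero =>
    intro _ q hq
    refine ⟨0, le_refl 0, ?_⟩
    have : q ∈ PySem.Set.ofList [(s, t)] := hq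
    have := (PySem.Set.mem_ofList _ _).mp this
    simpa [FV] using this
  | succ n ih =>
    intro hn q hq
    have hstep := FV_succ_eq s t n (F_free s t N hmin n (by omega))
    rcases step_vis_decomp _ _ _ _ _ hstep q hq with h | h
    · obtain ⟨j, hj, hF⟩ := ih (by omega) q h
      exact ⟨j, by omega, hF⟩
    · exact ⟨n + 1, le_refl _, h⟩

theorem Lv_in_V (s t : Int) (N : Nat) (hmin : ∀ i, i < N → ¬ existsDiag s t i) :
    ∀ n, n ≤ N → ∀ q ∈ Lv s t n, q ∈ (FV s t n).2 := by
  intro n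
  induction n with
  | zero =>
    intro _ q hq
    simp only [Lv] at hq
    have : q = (s, t) := by simpa using hq
    subst this
    exact (PySem.Set.mem_ofList _ _).mpr (by simp)
  | succ n ih =>
    intro hn q hq
    obtain ⟨p, hpLv, hps⟩ := List.mem_flatMap.mp hq
    have hpV : p ∈ (FV s t n).2 := ih (by omega) p hpLv
    obtain ⟨j, hj, hpF⟩ := V_decomp s t N hmin n (by omega) p hpV
    have hstep := FV_succ_eq s t j (F_free s t N hmin j (by omega))
    have hqV : q ∈ (FV s t (j + 1)).2 := step_expand _ _ _ _ _ hstep p hpF q hps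
    exact V_mono_le s t (j + 1) (n + 1) (by omega) q hqV

theorem diag_in_F (s t : Int) (N : Nat) (hN : existsDiag s t N)
    (hmin : ∀ i, i < N → ¬ existsDiag s t i) :
    ∃ q ∈ (FV s t N).1, q.1 = q.2 := by
  obtain ⟨d, hdLv, hdd⟩ := hN
  cases N with
  | zero =>
    have : d = (s, t) := by simpa [Lv] using hdLv
    subst this
    exact ⟨(s, t), by simp [FV], hdd⟩
  | succ M =>
    obtain ⟨p, hpLv, hps⟩ := List.mem_flatMap.mp hdLv
    have hpV : p ∈ (FV s t M).2 := Lv_in_V s t (M + 1) hmin M (by omega) p hpLv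
    obtain ⟨j, hj, hpF⟩ := V_decomp s t (M + 1) hmin M (by omega) p hpV
    have hstep := FV_succ_eq s t j (F_free s t (M + 1) hmin j (by omega))
    have hdV : d ∈ (FV s t (j + 1)).2 := step_expand _ _ _ _ _ hstep p hpF d hps
    obtain ⟨m, hm, hdF⟩ := V_decomp s t (M + 1) hmin (j + 1) (by omega) d hdV
    have hdLvm : d ∈ Lv s t m := F_sub_Lv s t (M + 1) hmin m (by omega) d hdF
    have hge : ¬ m < M + 1 := fun h => hmin m h ⟨d, hdLvm, hdd⟩
    have : m = M + 1 := by omega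
    subst this
    exact ⟨d, hdF, hdd⟩

theorem F_ne (s t : Int) (N : Nat) (hN : existsDiag s t N)
    (hmin : ∀ i, i < N → ¬ existsDiag s t i) :
    ∀ n, n ≤ N → (FV s t n).1 ≠ [] := by
  have prop : ∀ n, (FV s t n).1 = [] → (FV s t (n + 1)).1 = [] := by
    intro n h
    simp only [FV, h]
    rfl
  intro n hn hemp
  have h2 : ∀ k, (FV s t (n + k)).1 = [] := by
    intro k
    induction k with
    | zero => exact hemp
    | succ k ih => exact prop (n + k) ih
  have hNempty : (FV s t N).1 = [] := by
    have := h2 (N - n)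
    rwa [show n + (N - n) = N by omega] at this
  obtain ⟨q, hq, _⟩ := diag_in_F s t N hN hmin
  rw [hNempty] at hq
  simp at hq

theorem altLoop_run (s t : Int) (N : Nat) (hN : existsDiag s t N)
    (hmin : ∀ i, i < N → ¬ existsDiag s t i) :
    ∀ (m k f : Nat), k + m = N → m + 1 ≤ f →
    bfsAltLoop f (FV s t k).1 (FV s t k).2 (k : Int) = (N : Int) := by
  intro m
  induction m with
  | zero =>
    intro k f hk hf
    have hkN : k = N := by omega
    subst hkN
    obtain ⟨f', rfl⟩ : ∃ f', f = f' + 1 := ⟨f - 1, by omega⟩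
    have hne : (FV s t k).1 ≠ [] := F_ne s t k hN hmin k (le_refl k)
    have hnone : stepLevel (FV s t k).1 (FV s t k).2 [] = none :=
      step_none _ _ _ (diag_in_F s t k hN hmin)
    simp [bfsAltLoop, hne, hnone]
  | succ m ih =>
    intro k f hk hf
    obtain ⟨f', rfl⟩ : ∃ f', f = f' + 1 := ⟨f - 1, by omega⟩
    have hne : (FV s t k).1 ≠ [] := F_ne s t N hN hmin k (by omega)
    have hstep := FV_succ_eq s t k (F_free s t N hmin k (by omega))
    simp only [bfsAltLoop, hstep]
    rw [if_neg (by simpa using hne)]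
    have hcast : ((k : Int) + 1) = ((k + 1 : Nat) : Int) := by push_cast; ring
    rw [hcast]
    exact ih (k + 1) f' (by omega) (by omega)

theorem live_val (s t : Int) (b : Nat) (hb : existsDiag s t b)
    (hA : 2 ^ (b + 2) ≤ bfsFuel s t) (hB : b + 2 ≤ bfsAltFuel s t) :
    bfs s t = bfs_alt s t := by
  haveI := PDec s t
  have hP : ∃ n, existsDiag s t n := ⟨b, hb⟩
  have hNd : existsDiag s t (Nat.find hP) := Nat.find_spec hP
  have hmin : ∀ i, i < Nat.find hP → ¬ existsDiag s t i := fun i hi => Nat.find_min hP hi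
  have hNb : Nat.find hP ≤ b := Nat.find_min' hP hb
  set N := Nat.find hP with hNdef
  have hfree : ∀ i, i < N → ∀ p ∈ Lv s t (0 + i), p.1 ≠ p.2 := by
    intro i hi p hp hd
    exact hmin i hi ⟨p, by simpa using hp, hd⟩
  have hsum : (∑ i ∈ Finset.range (N + 1), (Lv s t (0 + i)).length) ≤ bfsFuel s t := by
    have h1 := sumLen s t N
    have h2 : (2 : Nat) ^ (N + 1) ≤ 2 ^ (b + 2) := Nat.pow_le_pow_right (by omega) (by omega)
    simp only [Nat.zero_add]
    omega
  have hdiag0 : existsDiag s t (0 + N) := by simpa using hNd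
  have hA' := bfsLoop_run s t N 0 (bfsFuel s t) hfree hdiag0 hsum
  have hq0 : (Lv s t 0).map (fun p => (p.1, p.2, ((0 : Nat) : Int))) = [(s, t, 0)] := by
    simp [Lv]
  rw [hq0] at hA'
  have hB' := altLoop_run s t N hNd hmin N 0 (bfsAltFuel s t) (by omega) (by omega)
  show bfsLoop (bfsFuel s t) [(s, t, 0)]
      = bfsAltLoop (bfsAltFuel s t) [(s, t)] (PySem.Set.ofList [(s, t)]) 0
  rw [hA']
  simp only [Nat.zero_add]
  have hfv : bfsAltLoop (bfsAltFuel s t) [(s, t)] (PySem.Set.ofList [(s, t)]) 0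
      = bfsAltLoop (bfsAltFuel s t) (FV s t 0).1 (FV s t 0).2 ((0 : Nat) : Int) := rfl
  rw [hfv, hB']

-- ===== VERDICT (by name: the statement is the Claim_ definition above) =====
theorem bfs_spec : Claim_equal_bfs := by
  intro s t _
  show bfs s t = bfs_alt s t
  by_cases h1 : s ≤ t
  · apply live_val s t (t - s).toNat
    · have h0 : (s, t) ∈ Lv s t 0 := by simp [Lv]
      have := path_up s t (t - s).toNat s t 0 h0 h1 rfl
      exact ⟨(t, t), by simpa using this, rfl⟩
    · rw [bfsFuel, if_pos h1]
    · rw [bfsAltFuel, if_pos h1]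
  · by_cases h2 : s * 2 ≤ t + 3
    · apply live_val s t (1 + (t + 3 - s * 2).toNat)
      · have h0 : (s, t) ∈ Lv s t 0 := by simp [Lv]
        have hs1 : (s * 2, t + 3) ∈ Lv s t 1 :=
          List.mem_flatMap.mpr ⟨(s, t), h0, mem_succs_two s t h2⟩
        have := path_up s t (t + 3 - s * 2).toNat (s * 2) (t + 3) 1 hs1 (by omega) rfl
        exact ⟨(t + 3, t + 3), by rwa [show (1 : Nat) + (t + 3 - s * 2).toNat = 1 + (t + 3 - s * 2).toNat from rfl] at this, rfl⟩
      · rw [bfsFuel, if_neg h1, if_pos h2]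
        exact Nat.pow_le_pow_right (by omega) (by omega)
      · rw [bfsAltFuel, if_neg h1, if_pos h2]
        omega
    · have hst : s ≠ t := by omega
      have h1' : ¬ (s + 1 ≤ t) := by omega
      rw [bfs, bfsFuel, if_neg h1, if_neg h2]
      rw [bfs_alt, bfsAltFuel, if_neg h1, if_neg h2]
      simp [bfsLoop, bfsAltLoop, stepLevel, pushChild, hst, h1', h2]
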